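-- pv_equiv track=rewrite | github.com/guib-l/Blocks | blocks/engine/python_install.py | remove_wrapper
-- ===== SOURCE A (Python) =====
-- def remove_wrapper(src, wrap_name='@task_node'):
--     lines = src.split('\n')
--     new_lines = []
--     skipping = True
--
--     for line in lines:
--         stripped = line.strip()
--         if stripped.startswith(wrap_name):
--             continue
--         if stripped.startswith('def '):
--             skipping = False
--         if skipping:continue
--
--         new_lines.append(line)
--     return "\n".join(new_lines)
-- ===== SOURCE B (Python) =====
-- def remove_wrapper(src, wrap_name='@task_node'):
--     lines = src.split('\n')
--     start = next((i for i, line in enumerate(lines)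
--                   if line.strip().startswith('def ')
--                   and not line.strip().startswith(wrap_name)), None)
--     if start is None:
--         return ''
--     return '\n'.join(line for line in lines[start:]
--                      if not line.strip().startswith(wrap_name))
-- ===== Notes on version B (the rewrite author's own statement) =====
-- stated objective: simpler
-- what changed: Replaces A's stateful boolean-flag loop by a locate-then-filter decomposition: find the index of the first def line not hidden by the wrapper prefix, then keep non-wrapper lines of the suffix.
import Mathlib
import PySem

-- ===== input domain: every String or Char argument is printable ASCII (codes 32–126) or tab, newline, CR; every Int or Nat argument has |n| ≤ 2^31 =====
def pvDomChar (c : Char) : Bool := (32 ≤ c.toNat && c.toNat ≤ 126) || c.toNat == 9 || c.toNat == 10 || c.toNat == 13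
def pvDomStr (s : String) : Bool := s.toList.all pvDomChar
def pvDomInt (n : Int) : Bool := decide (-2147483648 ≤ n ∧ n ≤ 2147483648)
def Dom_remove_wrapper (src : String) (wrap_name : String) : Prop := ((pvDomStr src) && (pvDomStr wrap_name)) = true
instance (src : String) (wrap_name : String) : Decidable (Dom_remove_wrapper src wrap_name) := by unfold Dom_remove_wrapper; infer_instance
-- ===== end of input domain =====

-- B replaces A's stateful boolean-flag loop by locate-then-filter: find the first
-- unwrapped def line, then filter wrapper lines out of the suffix (simpler decomposition).

-- ===== PORT A =====
-- one iteration of A's for-loop over the state (new_lines, skipping)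
def rwStepA (wrap_name : String) (st : List String × Bool) (line : String) : List String × Bool :=
  let stripped := PySem.Str.strip line
  if PySem.Str.startswith stripped wrap_name then st
  else
    let skipping := if PySem.Str.startswith stripped "def " then false else st.2
    if skipping then (st.1, skipping) else (st.1 ++ [line], skipping)

def remove_wrapper (src : String) (wrap_name : String) : String :=
  -- src.split('\n'): sep is the literal "\n" ≠ "", so split? is always some; getD [] is unreachable
  let lines := (PySem.Str.split? src "\n").getD []
  let st := lines.foldl (rwStepA wrap_name) ([], true)
  PySem.Str.join "\n" st.1

-- ===== PORT B =====
-- the first line whose stripped text starts with 'def ' but not with wrap_name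
def rwIsBoundary (wrap_name : String) (line : String) : Bool :=
  PySem.Str.startswith (PySem.Str.strip line) "def " &&
    !PySem.Str.startswith (PySem.Str.strip line) wrap_name

def rwKeep (wrap_name : String) (line : String) : Bool :=
  !PySem.Str.startswith (PySem.Str.strip line) wrap_name

def remove_wrapper_alt (src : String) (wrap_name : String) : String :=
  -- src.split('\n'): sep is the literal "\n" ≠ "", so split? is always some; getD [] is unreachable
  let lines := (PySem.Str.split? src "\n").getD []
  match lines.findIdx? (rwIsBoundary wrap_name) with
  | none => ""
  | some i => PySem.Str.join "\n" ((lines.drop i).filter (rwKeep wrap_name))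

-- ===== PRECONDITION & SPEC =====
def Spec_remove_wrapper (src : String) (wrap_name : String) (out : String) : Prop := out = remove_wrapper_alt src wrap_name
instance (src : String) (wrap_name : String) (out : String) : Decidable (Spec_remove_wrapper src wrap_name out) := by unfold Spec_remove_wrapper; infer_instance

-- ===== CLAIM (what is proved, stated in full; the proofs are below) =====
def Claim_equal_remove_wrapper : Prop := ∀ (src : String) (wrap_name : String), Dom_remove_wrapper src wrap_name → Spec_remove_wrapper src wrap_name (remove_wrapper src wrap_name)

-- ===== LEMMAS AND PROOFS =====

-- once skipping has flipped to False, A's loop just appends the lines rwKeep keeps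
lemma rwLoopFalse (wrap_name : String) (lines acc : List String) :
    lines.foldl (rwStepA wrap_name) (acc, false)
      = (acc ++ lines.filter (rwKeep wrap_name), false) := by
  induction lines generalizing acc with
  | nil => simp
  | cons l ls ih =>
    simp only [List.foldl_cons, List.filter_cons, rwKeep]
    by_cases hw : PySem.Chars.startswith (PySem.Chars.strip l.toList) wrap_name.toList
    · have hst : rwStepA wrap_name (acc, false) l = (acc, false) := by
        simp [rwStepA, hw]
      rw [hst, ih]; simp [hw]
    · have hst : rwStepA wrap_name (acc, false) l = (acc ++ [l], false) := by
        simp [rwStepA, hw]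
      rw [hst, ih]
      simp [hw]
-- while skipping is True, A's loop drops everything before the first boundary line
lemma rwLoopTrue (wrap_name : String) (lines : List String) :
    lines.foldl (rwStepA wrap_name) ([], true)
      = match lines.findIdx? (rwIsBoundary wrap_name) with
        | none => ([], true)
        | some i => ((lines.drop i).filter (rwKeep wrap_name), false) := by
  induction lines with
  | nil => simp
  | cons l ls ih =>
    by_cases hb : rwIsBoundary wrap_name l
    · simp only [rwIsBoundary, PySem.Str.startswith_eq, PySem.Str.toList_strip,
        Bool.and_eq_true, Bool.not_eq_true'] at hb
      have hd : PySem.Chars.startswith (PySem.Chars.strip l.toList) ['d','e','f',' '] = true := hb.1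
      have hw : PySem.Chars.startswith (PySem.Chars.strip l.toList) wrap_name.toList = false := hb.2
      have hst : rwStepA wrap_name ([], true) l = ([l], false) := by
        simp [rwStepA, hw, hd]
      simp only [List.findIdx?_cons, rwIsBoundary, PySem.Str.startswith_eq, PySem.Str.toList_strip,
        hw, Bool.not_false, List.foldl_cons, hst, rwLoopFalse]
      simp [hd, rwKeep, hw]
    · have hst : rwStepA wrap_name ([], true) l = ([], true) := by
        simp only [rwIsBoundary, PySem.Str.startswith_eq, PySem.Str.toList_strip,
          Bool.and_eq_true, Bool.not_eq_true', not_and] at hb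
        by_cases hw : PySem.Chars.startswith (PySem.Chars.strip l.toList) wrap_name.toList
        · simp [rwStepA, hw]
        · have hd : PySem.Chars.startswith (PySem.Chars.strip l.toList) ['d','e','f',' '] = false := by
            cases hdd : PySem.Chars.startswith (PySem.Chars.strip l.toList) ['d','e','f',' '] with
            | false => rfl
            | true => exact absurd (hb hdd) (by simp [hw])
          simp [rwStepA, hw, hd]
      have hbf : rwIsBoundary wrap_name l = false := by
        cases h : rwIsBoundary wrap_name l with
        | false => rfl
        | true => exact absurd h hb
      simp only [List.findIdx?_cons, hbf, Bool.false_eq_true, if_false, List.foldl_cons, hst, ih]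
      cases ls.findIdx? (rwIsBoundary wrap_name) <;> simp

-- ===== VERDICT (by name: the statement is the Claim_ definition above) =====
theorem remove_wrapper_spec : Claim_equal_remove_wrapper := by
  intro src wrap_name _
  unfold Spec_remove_wrapper remove_wrapper remove_wrapper_alt
  simp only [rwLoopTrue]
  cases h : ((PySem.Str.split? src "\n").getD []).findIdx? (rwIsBoundary wrap_name) <;>
    simp [PySem.Str.join, PySem.Chars.join, List.intercalate]
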